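-- pv_equiv track=rewrite | github.com/and19000/riq-labmatch | scripts/migrate_to_v2_schema.py | dept_field_key
-- ===== SOURCE A (Python) =====
-- def dept_field_key(department):
--     """Map a department name to a broad field key."""
--     if not department:
--         return "default"
--     d = department.lower()
--     if any(k in d for k in ["computer", "computing", "informatics", "data science"]):
--         return "cs"
--     if any(k in d for k in ["engineer", "mechanical", "aerospace", "aeronautic", "nuclear", "biomedical eng", "biological eng"]):
--         return "engineering"
--     if any(k in d for k in ["biology", "biological", "biochem", "genetic", "molecular", "microbio", "agricultural"]):
--         return "biology"
--     if any(k in d for k in ["chemistry", "chemical"]):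
--         return "chemistry"
--     if any(k in d for k in ["physics", "astro", "quantum"]):
--         return "physics"
--     if any(k in d for k in ["math", "statistic"]):
--         return "math"
--     if any(k in d for k in ["medicine", "medical", "health", "pharma", "nursing", "immuno"]):
--         return "medicine"
--     if any(k in d for k in ["neuro", "brain", "cognitive"]):
--         return "neuro"
--     if any(k in d for k in ["social", "politic", "sociology", "anthropo", "linguist", "psycho"]):
--         return "social"
--     if any(k in d for k in ["econom", "finance"]):
--         return "economics"
--     if any(k in d for k in ["material"]):
--         return "materials"
--     if any(k in d for k in ["earth", "planet", "geo", "ocean", "atmospher"]):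
--         return "earth"
--     if any(k in d for k in ["business", "management", "account"]):
--         return "business"
--     if any(k in d for k in ["art", "music", "theater", "literature", "humanit", "history", "philosoph"]):
--         return "arts"
--     if any(k in d for k in ["environment", "ecology", "climate", "sustainab"]):
--         return "env"
--     if any(k in d for k in ["energy"]):
--         return "energy"
--     return "default"
-- ===== SOURCE B (Python) =====
-- _TABLE = [
--     ("cs", ["computer", "computing", "informatics", "data science"]),
--     ("engineering", ["engineer", "mechanical", "aerospace", "aeronautic", "nuclear", "biomedical eng", "biological eng"]),
--     ("biology", ["biology", "biological", "biochem", "genetic", "molecular", "microbio", "agricultural"]),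
--     ("chemistry", ["chemistry", "chemical"]),
--     ("physics", ["physics", "astro", "quantum"]),
--     ("math", ["math", "statistic"]),
--     ("medicine", ["medicine", "medical", "health", "pharma", "nursing", "immuno"]),
--     ("neuro", ["neuro", "brain", "cognitive"]),
--     ("social", ["social", "politic", "sociology", "anthropo", "linguist", "psycho"]),
--     ("economics", ["econom", "finance"]),
--     ("materials", ["material"]),
--     ("earth", ["earth", "planet", "geo", "ocean", "atmospher"]),
--     ("business", ["business", "management", "account"]),
--     ("arts", ["art", "music", "theater", "literature", "humanit", "history", "philosoph"]),
--     ("env", ["environment", "ecology", "climate", "sustainab"]),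
--     ("energy", ["energy"]),
-- ]
--
-- # flat keyword -> (priority, category) index, built once
-- _KW = {kw: (prio, key) for prio, (key, kws) in enumerate(_TABLE) for kw in kws}
--
-- def dept_field_key(department):
--     """Map a department name to a broad field key."""
--     if not department:
--         return "default"
--     d = department.lower()
--     best = None
--     for kw, (prio, key) in _KW.items():
--         if kw in d and (best is None or prio < best[0]):
--             best = (prio, key)
--     return best[1] if best is not None else "default"
-- ===== Notes on version B (the rewrite author's own statement) =====
-- stated objective: alternative
-- what changed: B inverts the control flow: instead of 16 ordered category tests with early return, it builds a flat keyword->(priority,category) map once and makes a single pass over all keywords keeping the minimum-priority match.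
import Mathlib
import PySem

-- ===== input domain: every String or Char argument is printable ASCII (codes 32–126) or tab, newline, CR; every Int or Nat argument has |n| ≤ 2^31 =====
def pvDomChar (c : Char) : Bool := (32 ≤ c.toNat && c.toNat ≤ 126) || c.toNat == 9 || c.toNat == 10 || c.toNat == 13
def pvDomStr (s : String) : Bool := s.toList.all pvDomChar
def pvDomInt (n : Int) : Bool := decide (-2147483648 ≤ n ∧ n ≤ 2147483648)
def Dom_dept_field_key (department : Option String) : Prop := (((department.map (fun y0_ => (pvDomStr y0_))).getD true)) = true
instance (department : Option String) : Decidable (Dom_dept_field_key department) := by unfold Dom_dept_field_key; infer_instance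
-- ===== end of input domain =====

-- B inverts A's control flow: instead of testing categories in priority order with early return,
-- it scans a flat keyword -> (priority, category) map once and keeps the minimum-priority match (objective: alternative).

-- ===== PORT A =====
def dept_field_key (department : Option String) : String :=
  match department with
  | none => "default"
  | some s =>
    if s = "" then "default" else
    let d := PySem.Str.lower s
    if (["computer", "computing", "informatics", "data science"] : List String).any (fun k => PySem.Str.isIn k d) then "cs" else
    if (["engineer", "mechanical", "aerospace", "aeronautic", "nuclear", "biomedical eng", "biological eng"] : List String).any (fun k => PySem.Str.isIn k d) then "engineering" else
    if (["biology", "biological", "biochem", "genetic", "molecular", "microbio", "agricultural"] : List String).any (fun k => PySem.Str.isIn k d) then "biology" else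
    if (["chemistry", "chemical"] : List String).any (fun k => PySem.Str.isIn k d) then "chemistry" else
    if (["physics", "astro", "quantum"] : List String).any (fun k => PySem.Str.isIn k d) then "physics" else
    if (["math", "statistic"] : List String).any (fun k => PySem.Str.isIn k d) then "math" else
    if (["medicine", "medical", "health", "pharma", "nursing", "immuno"] : List String).any (fun k => PySem.Str.isIn k d) then "medicine" else
    if (["neuro", "brain", "cognitive"] : List String).any (fun k => PySem.Str.isIn k d) then "neuro" else
    if (["social", "politic", "sociology", "anthropo", "linguist", "psycho"] : List String).any (fun k => PySem.Str.isIn k d) then "social" else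
    if (["econom", "finance"] : List String).any (fun k => PySem.Str.isIn k d) then "economics" else
    if (["material"] : List String).any (fun k => PySem.Str.isIn k d) then "materials" else
    if (["earth", "planet", "geo", "ocean", "atmospher"] : List String).any (fun k => PySem.Str.isIn k d) then "earth" else
    if (["business", "management", "account"] : List String).any (fun k => PySem.Str.isIn k d) then "business" else
    if (["art", "music", "theater", "literature", "humanit", "history", "philosoph"] : List String).any (fun k => PySem.Str.isIn k d) then "arts" else
    if (["environment", "ecology", "climate", "sustainab"] : List String).any (fun k => PySem.Str.isIn k d) then "env" else
    if (["energy"] : List String).any (fun k => PySem.Str.isIn k d) then "energy" else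
    "default"

-- ===== PORT B =====
def fieldTable : List (String × List String) :=
  [ ("cs", ["computer", "computing", "informatics", "data science"]),
    ("engineering", ["engineer", "mechanical", "aerospace", "aeronautic", "nuclear", "biomedical eng", "biological eng"]),
    ("biology", ["biology", "biological", "biochem", "genetic", "molecular", "microbio", "agricultural"]),
    ("chemistry", ["chemistry", "chemical"]),
    ("physics", ["physics", "astro", "quantum"]),
    ("math", ["math", "statistic"]),
    ("medicine", ["medicine", "medical", "health", "pharma", "nursing", "immuno"]),
    ("neuro", ["neuro", "brain", "cognitive"]),
    ("social", ["social", "politic", "sociology", "anthropo", "linguist", "psycho"]),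
    ("economics", ["econom", "finance"]),
    ("materials", ["material"]),
    ("earth", ["earth", "planet", "geo", "ocean", "atmospher"]),
    ("business", ["business", "management", "account"]),
    ("arts", ["art", "music", "theater", "literature", "humanit", "history", "philosoph"]),
    ("env", ["environment", "ecology", "climate", "sustainab"]),
    ("energy", ["energy"]) ]

-- the flat keyword -> (priority, category) association list (_KW in Source B; keys are distinct)
def kwItems : List (String × Int × String) :=
  (PySem.List.enumerate fieldTable).flatMap (fun p => p.2.2.map (fun kw => (kw, (p.1, p.2.1))))

-- one loop step of Source B: keep the lower-priority match
def bestStep (d : String) (best : Option (Int × String)) (item : String × Int × String) : Option (Int × String) :=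
  if PySem.Str.isIn item.1 d && (match best with | none => true | some b => decide (item.2.1 < b.1)) then
    some item.2
  else best

def dept_field_key_alt (department : Option String) : String :=
  match department with
  | none => "default"
  | some s =>
    if s = "" then "default" else
    let d := PySem.Str.lower s
    match kwItems.foldl (bestStep d) none with
    | some b => b.2
    | none => "default"

-- ===== PRECONDITION & SPEC =====
def Spec_dept_field_key (department : Option String) (out : String) : Prop := out = dept_field_key_alt department
instance (department : Option String) (out : String) : Decidable (Spec_dept_field_key department out) := by unfold Spec_dept_field_key; infer_instance

-- ===== CLAIM (what is proved, stated in full; the proofs are below) =====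
def Claim_equal_dept_field_key : Prop := ∀ (department : Option String), Dom_dept_field_key department → Spec_dept_field_key department (dept_field_key department)

-- ===== LEMMAS AND PROOFS =====

-- proof-side abstractions: A's chain of branches, and the flat items with an index offset
def chain (d : String) : List (String × List String) → String
  | [] => "default"
  | (key, kws) :: rest => if kws.any (fun k => PySem.Str.isIn k d) then key else chain d rest

def itemsFrom (i : Int) : List (String × List String) → List (String × Int × String)
  | [] => []
  | (key, kws) :: rest => kws.map (fun kw => (kw, (i, key))) ++ itemsFrom (i + 1) rest

theorem itemsFrom_prio_ge (i : Int) (rows : List (String × List String))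
    (it : String × Int × String) (h : it ∈ itemsFrom i rows) : i ≤ it.2.1 := by
  induction rows generalizing i with
  | nil => simp [itemsFrom] at h
  | cons r rest ih =>
    obtain ⟨key, kws⟩ := r
    simp only [itemsFrom, List.mem_append, List.mem_map] at h
    rcases h with ⟨kw, _, rfl⟩ | h
    · simp
    · have := ih (i + 1) h; omega

theorem fold_frozen (d : String) (p : Int) (k : String)
    (items : List (String × Int × String)) (hb : ∀ it ∈ items, ¬ it.2.1 < p) :
    items.foldl (bestStep d) (some (p, k)) = some (p, k) := by
  induction items with
  | nil => rfl
  | cons it rest ih =>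
    have h := hb it (List.mem_cons_self ..)
    simp only [List.foldl_cons, bestStep, h, decide_false, Bool.and_false]
    exact ih (fun x hx => hb x (List.mem_cons_of_mem _ hx))

theorem row_fold (d : String) (i : Int) (key : String) (kws : List String) :
    (kws.map (fun kw => (kw, (i, key)))).foldl (bestStep d) none
      = if kws.any (fun k => PySem.Str.isIn k d) then some (i, key) else none := by
  induction kws with
  | nil => rfl
  | cons kw rest ih =>
    by_cases h : PySem.Str.isIn kw d = true
    · simp only [List.map_cons, List.foldl_cons, bestStep, h, Bool.true_and, if_true,
        List.any_cons, Bool.true_or]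
      exact fold_frozen d i key _ (by
        intro it hit
        simp only [List.mem_map] at hit
        obtain ⟨kw2, _, rfl⟩ := hit
        simp)
    · simp only [Bool.not_eq_true] at h
      simp only [List.map_cons, List.foldl_cons, bestStep, h, Bool.false_and,
        Bool.false_eq_true, if_false, List.any_cons, Bool.false_or]
      exact ih

theorem main_fold (d : String) (rows : List (String × List String)) (i : Int) :
    (match (itemsFrom i rows).foldl (bestStep d) none with
      | some b => b.2 | none => "default") = chain d rows := by
  induction rows generalizing i with
  | nil => rfl
  | cons r rest ih =>
    obtain ⟨key, kws⟩ := r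
    simp only [itemsFrom, chain, List.foldl_append, row_fold]
    by_cases h : kws.any (fun k => PySem.Str.isIn k d) = true
    · rw [if_pos h, if_pos h,
        fold_frozen d i key _ (fun it hit => by
          have := itemsFrom_prio_ge (i + 1) rest it hit; omega)]
    · simp only [Bool.not_eq_true] at h
      simp only [h, Bool.false_eq_true, if_false]
      exact ih (i + 1)

theorem kwItems_eq : kwItems = itemsFrom 0 fieldTable := by decide

-- ===== VERDICT (by name: the statement is the Claim_ definition above) =====
theorem dept_field_key_spec : Claim_equal_dept_field_key := by
  intro department _
  unfold Spec_dept_field_key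
  cases department with
  | none => rfl
  | some s =>
    by_cases h : s = ""
    · simp [dept_field_key, dept_field_key_alt, h]
    · have hb : dept_field_key_alt (some s) = chain (PySem.Str.lower s) fieldTable := by
        simp only [dept_field_key_alt, h, if_false, kwItems_eq]
        exact main_fold (PySem.Str.lower s) fieldTable 0
      have ha : dept_field_key (some s) = chain (PySem.Str.lower s) fieldTable := by
        simp only [dept_field_key, h, if_false, fieldTable, chain]
      rw [ha, hb]
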